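-- pv_equiv track=rewrite | github.com/Chris-Johnston/adventofcode | 2022/day17/part2.py | check_in_bounds
-- ===== SOURCE A (Python) =====
-- def check_in_bounds(piece: set, board: set):
--     for c in piece:
--         if c in board:
--             return False
--         if c[0] < 0:
--             return False
--         if c[0] > 6:
--             return False
--         if c[1] < 0:
--             return False
--     return True
-- ===== SOURCE B (Python) =====
-- def check_in_bounds(piece: set, board: set):
--     # collision: bulk set intersection
--     if set(piece) & set(board):
--         return False
--     # bounds: compare the piece's extreme coordinates against the walls
--     xs = [c[0] for c in piece]
--     ys = [c[1] for c in piece]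
--     return min(xs, default=0) >= 0 and max(xs, default=0) <= 6 and min(ys, default=0) >= 0
-- ===== Notes on version B (the rewrite author's own statement) =====
-- stated objective: alternative
-- what changed: Instead of testing every cell's bounds with early returns, B computes the piece's extreme coordinates (min x, max x, min y) and compares only those three aggregates against the walls, with collision done once as a bulk set intersection.
import Mathlib
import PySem

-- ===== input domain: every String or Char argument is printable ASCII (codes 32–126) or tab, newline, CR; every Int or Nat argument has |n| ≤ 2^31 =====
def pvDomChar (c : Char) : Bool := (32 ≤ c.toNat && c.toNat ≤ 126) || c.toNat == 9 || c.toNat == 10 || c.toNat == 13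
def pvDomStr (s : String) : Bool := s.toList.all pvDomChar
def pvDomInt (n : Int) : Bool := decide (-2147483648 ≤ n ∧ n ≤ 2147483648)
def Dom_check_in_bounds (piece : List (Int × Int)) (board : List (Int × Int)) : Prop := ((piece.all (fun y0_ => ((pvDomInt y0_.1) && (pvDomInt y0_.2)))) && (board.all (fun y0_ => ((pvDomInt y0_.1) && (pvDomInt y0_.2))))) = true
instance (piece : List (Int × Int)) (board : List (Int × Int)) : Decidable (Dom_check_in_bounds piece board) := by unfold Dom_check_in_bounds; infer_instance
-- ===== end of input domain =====

-- B replaces A's per-cell bounds checks with three aggregate extremes (min x, max x, min y)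
-- compared against the walls, plus one bulk set-intersection collision check (return value only).

-- ===== PORT A =====
-- A: for c in piece: early-return False on collision or any bound violation; else True.
def check_in_bounds (piece : List (Int × Int)) (board : List (Int × Int)) : Bool :=
  match piece with
  | [] => true
  | c :: rest =>
    if board.contains c then false
    else if c.1 < 0 then false
    else if c.1 > 6 then false
    else if c.2 < 0 then false
    else check_in_bounds rest board

-- ===== PORT B =====
-- Python min(xs, default=d) / max(xs, default=d) on ints
def pyMinD (d : Int) (xs : List Int) : Int :=
  match xs with
  | [] => d
  | h :: t => t.foldl min h

def pyMaxD (d : Int) (xs : List Int) : Int :=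
  match xs with
  | [] => d
  | h :: t => t.foldl max h

-- B: collision via set intersection `set(piece) & set(board)`; bounds via the extremes.
def check_in_bounds_alt (piece : List (Int × Int)) (board : List (Int × Int)) : Bool :=
  if (piece.filter (fun c => board.contains c)) ≠ [] then false
  else
    let xs := piece.map Prod.fst
    let ys := piece.map Prod.snd
    decide (0 ≤ pyMinD 0 xs) && decide (pyMaxD 0 xs ≤ 6) && decide (0 ≤ pyMinD 0 ys)

-- ===== PRECONDITION & SPEC =====
def Spec_check_in_bounds (piece : List (Int × Int)) (board : List (Int × Int)) (out : Bool) : Prop := out = check_in_bounds_alt piece board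
instance (piece : List (Int × Int)) (board : List (Int × Int)) (out : Bool) : Decidable (Spec_check_in_bounds piece board out) := by unfold Spec_check_in_bounds; infer_instance

-- ===== CLAIM (what is proved, stated in full; the proofs are below) =====
def Claim_equal_check_in_bounds : Prop := ∀ (piece : List (Int × Int)) (board : List (Int × Int)), Dom_check_in_bounds piece board → Spec_check_in_bounds piece board (check_in_bounds piece board)

-- ===== LEMMAS AND PROOFS =====

theorem le_foldl_min (a h : Int) (t : List Int) :
    a ≤ t.foldl min h ↔ a ≤ h ∧ ∀ x ∈ t, a ≤ x := by
  induction t generalizing h with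
  | nil => simp
  | cons x t ih =>
    simp only [List.foldl_cons, ih, le_min_iff, List.mem_cons]
    constructor
    · rintro ⟨⟨h1, h2⟩, h3⟩
      exact ⟨h1, fun y hy => hy.elim (fun e => e ▸ h2) (h3 y)⟩
    · rintro ⟨h1, h2⟩
      exact ⟨⟨h1, h2 x (Or.inl rfl)⟩, fun y hy => h2 y (Or.inr hy)⟩

theorem foldl_max_le (a h : Int) (t : List Int) :
    t.foldl max h ≤ a ↔ h ≤ a ∧ ∀ x ∈ t, x ≤ a := by
  induction t generalizing h with
  | nil => simp
  | cons x t ih =>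
    simp only [List.foldl_cons, ih, max_le_iff, List.mem_cons]
    constructor
    · rintro ⟨⟨h1, h2⟩, h3⟩
      exact ⟨h1, fun y hy => hy.elim (fun e => e ▸ h2) (h3 y)⟩
    · rintro ⟨h1, h2⟩
      exact ⟨⟨h1, h2 x (Or.inl rfl)⟩, fun y hy => h2 y (Or.inr hy)⟩

theorem pyMinD_zero_nonneg (xs : List Int) :
    0 ≤ pyMinD 0 xs ↔ ∀ x ∈ xs, 0 ≤ x := by
  cases xs with
  | nil => simp [pyMinD]
  | cons h t => simp [pyMinD, le_foldl_min]

theorem pyMaxD_zero_le_six (xs : List Int) :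
    pyMaxD 0 xs ≤ 6 ↔ ∀ x ∈ xs, x ≤ 6 := by
  cases xs with
  | nil => simp [pyMaxD]
  | cons h t => simp [pyMaxD, foldl_max_le]

-- Pointwise characterisation of B.
theorem alt_iff (piece board : List (Int × Int)) :
    check_in_bounds_alt piece board = true ↔
      ∀ c ∈ piece, c ∉ board ∧ 0 ≤ c.1 ∧ c.1 ≤ 6 ∧ 0 ≤ c.2 := by
  unfold check_in_bounds_alt
  by_cases hf : piece.filter (fun c => board.contains c) = []
  · simp only [hf, ne_eq, not_true_eq_false, if_false, Bool.and_eq_true, decide_eq_true_eq,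
      pyMinD_zero_nonneg, pyMaxD_zero_le_six, List.mem_map]
    rw [List.filter_eq_nil_iff] at hf
    simp only [List.contains_eq_mem, decide_eq_true_eq] at hf
    constructor
    · rintro ⟨⟨h1, h2⟩, h3⟩ c hc
      exact ⟨hf c hc, h1 _ ⟨c, hc, rfl⟩, h2 _ ⟨c, hc, rfl⟩, h3 _ ⟨c, hc, rfl⟩⟩
    · intro h
      refine ⟨⟨?_, ?_⟩, ?_⟩ <;> rintro x ⟨c, hc, rfl⟩
      · exact (h c hc).2.1
      · exact (h c hc).2.2.1
      · exact (h c hc).2.2.2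
  · simp only [hf, ne_eq, not_false_eq_true, if_true, Bool.false_eq_true, false_iff, not_forall]
    obtain ⟨c, hc⟩ := List.exists_mem_of_ne_nil _ hf
    have := List.of_mem_filter hc
    simp only [List.contains_eq_mem, decide_eq_true_eq] at this
    exact ⟨c, List.mem_of_mem_filter hc, fun h => (h.1 this).elim⟩

-- Pointwise characterisation of A.
theorem a_iff (piece board : List (Int × Int)) :
    check_in_bounds piece board = true ↔
      ∀ c ∈ piece, c ∉ board ∧ 0 ≤ c.1 ∧ c.1 ≤ 6 ∧ 0 ≤ c.2 := by
  induction piece with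
  | nil => simp [check_in_bounds]
  | cons c rest ih =>
    simp only [check_in_bounds, List.mem_cons, List.contains_eq_mem]
    split_ifs with h1 h2 h3 h4 <;> simp_all

-- ===== VERDICT (by name: the statement is the Claim_ definition above) =====
theorem check_in_bounds_spec : Claim_equal_check_in_bounds := by
  intro piece board _
  unfold Spec_check_in_bounds
  rw [Bool.eq_iff_iff, a_iff, alt_iff]
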